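-- pv_equiv track=rewrite | github.com/andreb999999/pAI-physics | consortium/toolkits/writeup/latex_generator_tool.py | _clean_latex_output
-- ===== SOURCE A (Python) =====
-- def _clean_latex_output(raw_output: str) -> str:
--     """Clean and format the LaTeX output."""
--     content = raw_output.strip()
--     content = content.replace("```latex", "").replace("```", "").strip()
--
--     content = content.replace("\\section{", "\n\\section{")
--     content = content.replace("\\subsection{", "\n\\subsection{")
--     content = content.replace("\\subsubsection{", "\n\\subsubsection{")
--
--     lines = content.split("\n")
--     cleaned_lines = []
--     for line in lines:
--         cleaned_line = line.strip()
--         if cleaned_line: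
--             cleaned_lines.append(cleaned_line)
--         elif cleaned_lines and cleaned_lines[-1]:
--             cleaned_lines.append("")
--
--     return "\n".join(cleaned_lines)
-- ===== SOURCE B (Python) =====
-- def _clean_latex_output(raw_output: str) -> str:
--     """Clean and format the LaTeX output."""
--     content = raw_output.strip()
--     content = content.replace("```latex", "").replace("```", "").strip()
--
--     content = content.replace("\\section{", "\n\\section{")
--     content = content.replace("\\subsection{", "\n\\subsection{")
--     content = content.replace("\\subsubsection{", "\n\\subsubsection{")
--
--     stripped = [line.strip() for line in content.split("\n")]
--     # stateless pairwise filter: keep a line if it is non-empty, or if the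
--     # previous stripped line was non-empty (collapses blank runs to one "")
--     pairs = zip([""] + stripped, stripped)
--     return "\n".join(cur for prev, cur in pairs if cur or prev)
-- ===== Notes on version B (the rewrite author's own statement) =====
-- stated objective: alternative
-- what changed: Replaces A's stateful accumulator loop (which inspects the last appended element to decide whether to emit a blank) with a stateless pairwise traversal: strip all lines once, zip each line with its predecessor, and keep a line iff it or its predecessor is non-empty.
import Mathlib
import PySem

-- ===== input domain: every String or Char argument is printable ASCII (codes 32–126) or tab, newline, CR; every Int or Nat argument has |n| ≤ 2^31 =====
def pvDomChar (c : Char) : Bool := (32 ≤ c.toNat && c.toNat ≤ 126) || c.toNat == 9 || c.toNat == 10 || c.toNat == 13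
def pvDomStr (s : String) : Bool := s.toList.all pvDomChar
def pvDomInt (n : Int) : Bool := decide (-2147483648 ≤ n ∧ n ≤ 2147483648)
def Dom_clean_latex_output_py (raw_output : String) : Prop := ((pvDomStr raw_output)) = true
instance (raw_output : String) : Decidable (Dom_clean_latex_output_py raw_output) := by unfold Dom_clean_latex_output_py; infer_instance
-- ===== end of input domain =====

-- B replaces A's stateful last-element accumulator with a stateless pairwise
-- (previous, current) zip-filter over the stripped lines; objective: alternative decomposition.


-- shared prefix normalization (identical lines of both Pythons)
def pvNormalize (raw_output : String) : String :=
  let content := PySem.Str.strip raw_output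
  let content := PySem.Str.strip (PySem.Str.replace (PySem.Str.replace content "```latex" "") "```" "")
  let content := PySem.Str.replace content "\\section{" "\n\\section{"
  let content := PySem.Str.replace content "\\subsection{" "\n\\subsection{"
  PySem.Str.replace content "\\subsubsection{" "\n\\subsubsection{"

-- ===== PORT A =====
-- A's loop: append stripped line if non-empty; else append "" iff cleaned_lines and cleaned_lines[-1]
def aLoop : List String → List String → List String
  | [], acc => acc
  | line :: ls, acc =>
    let cleaned := PySem.Str.strip line
    if cleaned ≠ "" then aLoop ls (acc ++ [cleaned])
    else if acc.getLast?.getD "" ≠ "" then aLoop ls (acc ++ [""])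
    else aLoop ls acc

def clean_latex_output_py (raw_output : String) : String :=
  let content := pvNormalize raw_output
  let lines := (PySem.Str.split? content "\n").getD []
  PySem.Str.join "\n" (aLoop lines [])

-- ===== PORT B =====
def clean_latex_output_py_alt (raw_output : String) : String :=
  let content := pvNormalize raw_output
  let stripped := ((PySem.Str.split? content "\n").getD []).map PySem.Str.strip
  let kept := ((("" :: stripped).zip stripped).filter
      (fun p => p.2 ≠ "" || p.1 ≠ "")).map Prod.snd
  PySem.Str.join "\n" kept

-- ===== PRECONDITION & SPEC =====
def Spec_clean_latex_output_py (raw_output : String) (out : String) : Prop := out = clean_latex_output_py_alt raw_output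
instance (raw_output : String) (out : String) : Decidable (Spec_clean_latex_output_py raw_output out) := by unfold Spec_clean_latex_output_py; infer_instance

-- ===== CLAIM (what is proved, stated in full; the proofs are below) =====
def Claim_equal_clean_latex_output_py : Prop := ∀ (raw_output : String), Dom_clean_latex_output_py raw_output → Spec_clean_latex_output_py raw_output (clean_latex_output_py raw_output)

-- ===== LEMMAS AND PROOFS =====

-- recursive characterization of B's zip-filter, threading the previous stripped line
def bKept : String → List String → List String
  | _, [] => []
  | p, c :: cs => if c ≠ "" then c :: bKept c cs
                  else (if p ≠ "" then [""] else []) ++ bKept c cs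

theorem bKept_eq_zip_filter (p : String) (cs : List String) :
    (((p :: cs).zip cs).filter (fun q => q.2 ≠ "" || q.1 ≠ "")).map Prod.snd = bKept p cs := by
  induction cs generalizing p with
  | nil => rfl
  | cons c cs ih =>
    by_cases hc : c = "" <;> by_cases hp : p = "" <;>
      simp [bKept, hc, hp] <;> simpa [hc] using ih c

theorem aLoop_eq_bKept (lines : List String) (acc : List String) (p : String)
    (h : (acc.getLast?.getD "" ≠ "") = (p ≠ "")) :
    aLoop lines acc = acc ++ bKept p (lines.map PySem.Str.strip) := by
  induction lines generalizing acc p with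
  | nil => simp [aLoop, bKept]
  | cons l ls ih =>
    simp only [aLoop, List.map_cons, bKept]
    by_cases hc : PySem.Str.strip l = ""
    · by_cases hp : p = ""
      · have h' : acc.getLast?.getD "" = "" := by
          by_contra hne; rw [hp] at h; simp [hne] at h
        simp [hc, hp, h', ih acc "" (by rw [h]; simp [hp])]
      · have h' : acc.getLast?.getD "" ≠ "" := by rw [h]; exact hp
        have := ih (acc ++ [""]) "" (by simp)
        simp [hc, hp, h', this]
    · have := ih (acc ++ [PySem.Str.strip l]) (PySem.Str.strip l) (by simp)
      simp [hc, this]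

-- ===== VERDICT (by name: the statement is the Claim_ definition above) =====
theorem ports_eq (lines : List String) :
    PySem.Str.join "\n" (aLoop lines []) =
    PySem.Str.join "\n" (((("" :: lines.map PySem.Str.strip).zip
        (lines.map PySem.Str.strip)).filter (fun p => p.2 ≠ "" || p.1 ≠ "")).map Prod.snd) := by
  rw [bKept_eq_zip_filter, aLoop_eq_bKept _ [] "" (by simp)]
  rfl

theorem clean_latex_output_py_spec : Claim_equal_clean_latex_output_py :=
  fun raw_output _ => ports_eq ((PySem.Str.split? (pvNormalize raw_output) "\n").getD [])
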